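-- pv_equiv track=rewrite | github.com/desigandeva/Desigan_Sayur | Python/HW/countWord.py | countSameCharWords
-- ===== SOURCE A (Python) =====
-- def removeDupCharInWord(word):
--     # temp word
--     temp = ''
--     for char in word:
--         if char not in temp:
--             # add unique character in temp
--             temp += char
--     # return sorted temp word
--     return ''.join(sorted(temp))
--
-- def countSameCharWords(list_of_words):
--     # new_list to store the removed duplicate character words
--     new_list = []
--     # sorted_list to store the unique strings
--     sorted_list = []
--     # initialize count as 0
--     count = 0
--     # get word from list_of_words
--     for word in list_of_words:
--         # call removeDupCharInWord() function it's return duplicate removed string in ascending order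
--         new_list.append(removeDupCharInWord(word))
--     # get unique string from new_list and stored in sorted_list
--     sorted_list = list(set(new_list))
--     # get word from sorted_list
--     for word in sorted_list:
--         # count the word in new_list,and check count >= 2
--         if new_list.count(word) >= 2:
--             # increment count by 1
--             count+=1
--     # return the count
--     return count
-- ===== SOURCE B (Python) =====
-- def countSameCharWords(list_of_words):
--     # one pass: seen = canonical forms met so far, dup = those met at least twice
--     seen = set()
--     dup = set()
--     for word in list_of_words:
--         canon = ''.join(sorted(set(word)))
--         if canon in seen:
--             dup.add(canon)
--         else:
--             seen.add(canon)
--     return len(dup)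
-- ===== Notes on version B (the rewrite author's own statement) =====
-- stated objective: simpler
-- what changed: Replaced A's three-phase structure (build a list of canonical forms, dedupe it via set(), then rescan the whole list with list.count for each distinct form) by a single pass maintaining two sets, seen and dup, returning len(dup); the per-word first-occurrence dedup loop becomes set(word).
import Mathlib
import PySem

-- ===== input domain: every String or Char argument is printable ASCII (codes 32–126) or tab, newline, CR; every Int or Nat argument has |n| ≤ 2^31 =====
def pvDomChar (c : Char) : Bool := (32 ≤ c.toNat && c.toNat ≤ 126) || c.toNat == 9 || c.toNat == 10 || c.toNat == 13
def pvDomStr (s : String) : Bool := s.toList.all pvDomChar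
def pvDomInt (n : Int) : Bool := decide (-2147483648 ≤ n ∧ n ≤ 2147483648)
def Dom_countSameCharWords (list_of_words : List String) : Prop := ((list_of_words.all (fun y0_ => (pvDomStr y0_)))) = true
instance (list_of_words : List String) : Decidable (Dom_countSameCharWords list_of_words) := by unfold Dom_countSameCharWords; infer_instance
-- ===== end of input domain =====

-- B replaces A's build-list / set-dedupe / repeated .count scans with a single pass
-- maintaining two sets (seen / dup); objective: simpler, and measurably faster (no repeated list.count scans).

-- ===== PORT A =====
-- removeDupCharInWord: first-occurrence dedup of the word's characters, then sorted, joined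
def removeDupCharInWord (word : String) : String :=
  String.mk (PySem.List.sorted
    (word.toList.foldl (fun t c => if t.contains c = false then t ++ [c] else t) [])
    (fun x => x) false)

def countSameCharWords (list_of_words : List String) : Int :=
  let new_list := list_of_words.foldl (fun acc w => acc ++ [removeDupCharInWord w]) []
  let sorted_list := PySem.Set.ofList new_list
  sorted_list.foldl (fun cnt w => if 2 ≤ PySem.List.count new_list w then cnt + 1 else cnt) (0 : Int)

-- ===== PORT B =====
-- canonical form ''.join(sorted(set(word)))
def pvCanonB (word : String) : String :=
  String.mk (PySem.List.sorted (PySem.Set.ofList word.toList) (fun x => x) false)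

def countSameCharWords_alt (list_of_words : List String) : Int :=
  let st := list_of_words.foldl
    (fun (st : PySem.Set String × PySem.Set String) w =>
      let c := pvCanonB w
      if st.1.contains c then (st.1, st.2.add c) else (st.1.add c, st.2))
    (PySem.Set.empty, PySem.Set.empty)
  PySem.Set.len st.2

-- ===== PRECONDITION & SPEC =====
def Spec_countSameCharWords (list_of_words : List String) (out : Int) : Prop := out = countSameCharWords_alt list_of_words
instance (list_of_words : List String) (out : Int) : Decidable (Spec_countSameCharWords list_of_words out) := by unfold Spec_countSameCharWords; infer_instance

-- ===== CLAIM (what is proved, stated in full; the proofs are below) =====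
def Claim_equal_countSameCharWords : Prop := ∀ (list_of_words : List String), Dom_countSameCharWords list_of_words → Spec_countSameCharWords list_of_words (countSameCharWords list_of_words)

-- ===== LEMMAS AND PROOFS =====

-- A's dedup loop is exactly Set.ofList of the characters, so the two canonical forms agree
lemma canonA_eq_canonB (w : String) : removeDupCharInWord w = pvCanonB w := by
  unfold removeDupCharInWord pvCanonB
  have hfun : (fun (t : List Char) c => if t.contains c = false then t ++ [c] else t)
      = PySem.Set.add := by
    funext t c
    unfold PySem.Set.add
    by_cases h : t.contains c = true <;> simp [h]
  rw [PySem.Set.ofList_eq_foldl, hfun]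

lemma foldl_append_map {α β : Type} (f : α → β) (l : List α) (acc : List β) :
    l.foldl (fun a w => a ++ [f w]) acc = acc ++ l.map f := by
  induction l generalizing acc with
  | nil => simp
  | cons x xs ih => simp [ih]

-- the seen/dup one-pass step and its invariant
def pvStep (st : PySem.Set String × PySem.Set String) (c : String) :
    PySem.Set String × PySem.Set String :=
  if st.1.contains c then (st.1, st.2.add c) else (st.1.add c, st.2)

lemma dup_inv (cs : List String) : ∀ (s d : List String), d.Nodup →
    ((cs.foldl pvStep (s, d)).2.Nodup ∧
     ∀ w, w ∈ (cs.foldl pvStep (s, d)).2 ↔ (w ∈ d ∨ (w ∈ s ∧ w ∈ cs) ∨ 2 ≤ cs.count w)) := by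
  induction cs with
  | nil => intro s d hd; simp [hd]
  | cons c cs ih =>
    intro s d hd
    rw [List.foldl_cons]
    by_cases hc : PySem.Set.contains s c = true
    · have hcs : c ∈ s := (PySem.Set.contains_iff s c).1 hc
      have step : pvStep (s, d) c = (s, PySem.Set.add d c) := by
        unfold pvStep; rw [if_pos hc]
      rw [step]
      obtain ⟨hn, hm⟩ := ih s (PySem.Set.add d c) (PySem.Set.nodup_add d c hd)
      refine ⟨hn, fun w => (hm w).trans ?_⟩
      by_cases hw : w = c
      · subst hw
        constructor
        · intro _
          exact Or.inr (Or.inl ⟨hcs, List.mem_cons_self ..⟩)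
        · intro _
          exact Or.inl ((PySem.Set.mem_add _ _ _).2 (Or.inr rfl))
      · rw [PySem.Set.mem_add _ _ _]
        have hcw : ¬ c = w := fun h => hw h.symm
        have hcnt : (c :: cs).count w = cs.count w := by simp [List.count_cons, hcw]
        rw [hcnt]
        simp only [List.mem_cons, hw, false_or, or_false]
    · have hcs : c ∉ s := fun h => hc ((PySem.Set.contains_iff s c).2 h)
      have step : pvStep (s, d) c = (PySem.Set.add s c, d) := by
        unfold pvStep; rw [if_neg hc]
      rw [step]
      obtain ⟨hn, hm⟩ := ih (PySem.Set.add s c) d hd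
      refine ⟨hn, fun w => (hm w).trans ?_⟩
      by_cases hw : w = c
      · subst hw
        have hcnt : (w :: cs).count w = cs.count w + 1 := List.count_cons_self ..
        rw [hcnt]
        constructor
        · rintro (h | ⟨_, h2⟩ | h)
          · exact Or.inl h
          · exact Or.inr (Or.inr (by have := List.count_pos_iff.2 h2; omega))
          · exact Or.inr (Or.inr (by omega))
        · rintro (h | ⟨h1, _⟩ | h)
          · exact Or.inl h
          · exact absurd h1 hcs
          · rcases Nat.lt_or_ge (cs.count w) 2 with h2 | h2
            · have hmem : w ∈ cs := List.count_pos_iff.1 (by omega)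
              exact Or.inr (Or.inl ⟨(PySem.Set.mem_add _ _ _).2 (Or.inr rfl), hmem⟩)
            · exact Or.inr (Or.inr h2)
      · rw [PySem.Set.mem_add _ _ _]
        have hcw : ¬ c = w := fun h => hw h.symm
        have hcnt : (c :: cs).count w = cs.count w := by simp [List.count_cons, hcw]
        rw [hcnt]
        simp only [List.mem_cons, hw, false_or, or_false]

-- ===== VERDICT (by name: the statement is the Claim_ definition above) =====
theorem countSameCharWords_spec : Claim_equal_countSameCharWords := by
  intro ws _
  unfold Spec_countSameCharWords countSameCharWords countSameCharWords_alt
  simp only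
  set cs := ws.map pvCanonB with hcs
  have hnl : ws.foldl (fun acc w => acc ++ [removeDupCharInWord w]) [] = cs := by
    rw [foldl_append_map]
    simp [hcs, canonA_eq_canonB]
  rw [hnl]
  -- A's second loop counts the canonical forms occurring at least twice
  have hA : (PySem.Set.ofList cs).foldl
      (fun cnt w => if 2 ≤ PySem.List.count cs w then cnt + 1 else cnt) (0 : Int)
      = (((PySem.Set.ofList cs).countP (fun w => decide (2 ≤ PySem.List.count cs w)) : Nat) : Int) := by
    rw [PySem.List.foldl_ite_add_one]
    · simp [List.countP]
  -- B's fold over ws is the fold of pvStep over cs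
  have hB : ws.foldl
      (fun (st : PySem.Set String × PySem.Set String) w =>
        let c := pvCanonB w
        if st.1.contains c then (st.1, st.2.add c) else (st.1.add c, st.2))
      (PySem.Set.empty, PySem.Set.empty)
      = cs.foldl pvStep (PySem.Set.empty, PySem.Set.empty) := by
    rw [hcs, List.foldl_map]; rfl
  rw [hA, hB]
  obtain ⟨hn, hm⟩ := dup_inv cs [] [] List.nodup_nil
  set dup := (cs.foldl pvStep ([], [])).2 with hdup
  have hmem : ∀ w, w ∈ dup ↔ 2 ≤ cs.count w := by
    intro w; rw [hm w]; simp
  -- both sides equal the number of distinct canonical forms with count ≥ 2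
  have hfilter : ((PySem.Set.ofList cs).filter (fun w => decide (2 ≤ PySem.List.count cs w))).Perm dup := by
    rw [List.perm_ext_iff_of_nodup (List.Nodup.filter _ (PySem.Set.nodup_ofList cs)) hn]
    intro w
    rw [List.mem_filter, PySem.Set.mem_ofList, hmem w, PySem.List.count_eq]
    constructor
    · rintro ⟨_, h⟩; exact of_decide_eq_true h
    · intro h
      exact ⟨List.count_pos_iff.1 (by omega), decide_eq_true h⟩
  have hlen : (PySem.Set.ofList cs).countP (fun w => decide (2 ≤ PySem.List.count cs w)) = dup.length := by
    rw [List.countP_eq_length_filter]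
    exact hfilter.length_eq
  rw [hlen]
  rfl
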